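-- pv_equiv track=rewrite | github.com/Pramod-Potti-Krishnan/deckster-w-content-strategist | src/agents/diagram_microservice_v2/archives/v1_implementations/mermaid_agent_v1.py | _generate_state_diagram
-- ===== SOURCE A (Python) =====
-- from typing import Dict, Any, List
--
-- def _generate_state_diagram(data_points: List[Dict[str, Any]]) -> str:
--     """Generate state diagram Mermaid code"""
--
--     lines = ["stateDiagram-v2"]
--
--     for i, point in enumerate(data_points):
--         label = point.get("label", f"State{i+1}")
--
--         if i == 0:
--             lines.append(f"    [*] --> {label}")
--         else:
--             prev_label = data_points[i-1].get("label", f"State{i}")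
--             lines.append(f"    {prev_label} --> {label}")
--
--         if i == len(data_points) - 1:
--             lines.append(f"    {label} --> [*]")
--
--     return "\n".join(lines)
-- ===== SOURCE B (Python) =====
-- def _generate_state_diagram(data_points):
--     """Generate state diagram Mermaid code"""
--     out = "stateDiagram-v2"
--     if not data_points:
--         return out
--     nodes = ["[*]"]
--     for i, point in enumerate(data_points):
--         nodes.append(point.get("label", f"State{i+1}"))
--     nodes.append("[*]")
--     for a, b in zip(nodes, nodes[1:]):
--         out += f"\n    {a} --> {b}"
--     return out
-- ===== Notes on version B (the rewrite author's own statement) =====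
-- stated objective: simpler
-- what changed: B replaces A's three-way case analysis (entry edge when i==0, middle edge reading data_points[i-1], exit edge when i==len-1) by a sentinel construction: it builds the node sequence [*], labels..., [*] and emits ONE uniform 'a --> b' rule over consecutive node pairs, accumulating the output string directly instead of a list joined at the end.
import Mathlib
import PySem

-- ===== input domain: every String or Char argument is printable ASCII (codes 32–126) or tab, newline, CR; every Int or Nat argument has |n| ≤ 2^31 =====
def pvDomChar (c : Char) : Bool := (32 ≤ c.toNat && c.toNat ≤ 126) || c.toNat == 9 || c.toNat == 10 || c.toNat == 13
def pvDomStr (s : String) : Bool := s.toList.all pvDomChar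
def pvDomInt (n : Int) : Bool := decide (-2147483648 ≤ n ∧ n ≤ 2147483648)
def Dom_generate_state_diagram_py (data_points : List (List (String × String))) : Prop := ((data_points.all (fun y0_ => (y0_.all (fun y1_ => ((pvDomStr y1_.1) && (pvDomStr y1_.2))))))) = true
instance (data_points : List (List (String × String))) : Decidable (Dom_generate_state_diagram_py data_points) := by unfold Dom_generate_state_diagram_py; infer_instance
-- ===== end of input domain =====

-- B builds the sentinel-augmented node sequence [*], labels…, [*] and emits one uniform edge rule over consecutive pairs, removing A's entry/middle/exit case analysis; same output (proved below).

-- ===== PORT A =====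
def generate_state_diagram_py (data_points : List (List (String × String))) : String :=
  let lines : List String := ["stateDiagram-v2"]
  let lines := (PySem.List.enumerate data_points).foldl (fun lines ip =>
    let i := ip.1
    let point := ip.2
    let label := PySem.Dict.getD (PySem.Dict.mk point) "label" ("State" ++ PySem.Int.toStr (i + 1))
    let lines := if i == 0 then lines ++ ["    [*] --> " ++ label]
      else
        let prev_label := PySem.Dict.getD (PySem.Dict.mk (PySem.List.pyGetD data_points (i - 1) [])) "label" ("State" ++ PySem.Int.toStr i)
        lines ++ ["    " ++ prev_label ++ " --> " ++ label]
    if i == (data_points.length : Int) - 1 then lines ++ ["    " ++ label ++ " --> [*]"] else lines) lines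
  PySem.Str.join "\n" lines

-- ===== PORT B =====
def generate_state_diagram_py_alt (data_points : List (List (String × String))) : String :=
  let out := "stateDiagram-v2"
  if data_points.isEmpty then out
  else
    let nodes : List String := ["[*]"]
    let nodes := (PySem.List.enumerate data_points).foldl (fun ns ip =>
      ns ++ [PySem.Dict.getD (PySem.Dict.mk ip.2) "label" ("State" ++ PySem.Int.toStr (ip.1 + 1))]) nodes
    let nodes := nodes ++ ["[*]"]
    (nodes.zip (PySem.List.slice nodes (some 1) none)).foldl
      (fun acc ab => acc ++ "\n    " ++ ab.1 ++ " --> " ++ ab.2) out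

-- ===== PRECONDITION & SPEC =====
def Spec_generate_state_diagram_py (data_points : List (List (String × String))) (out : String) : Prop := out = generate_state_diagram_py_alt data_points
instance (data_points : List (List (String × String))) (out : String) : Decidable (Spec_generate_state_diagram_py data_points out) := by unfold Spec_generate_state_diagram_py; infer_instance

-- ===== CLAIM (what is proved, stated in full; the proofs are below) =====
def Claim_equal_generate_state_diagram_py : Prop := ∀ (data_points : List (List (String × String))), Dom_generate_state_diagram_py data_points → Spec_generate_state_diagram_py data_points (generate_state_diagram_py data_points)

-- ===== LEMMAS AND PROOFS =====

def pvTr (a b : String) : String := "    " ++ a ++ " --> " ++ b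

def pvFin (s : String) : String := "    " ++ s ++ " --> [*]"

lemma pvShift {β : Type} (f : Nat → List β) (n : Nat) :
    (List.range (n + 1)).flatMap f = f 0 ++ (List.range n).flatMap (fun k => f (k + 1)) := by
  rw [List.range_succ_eq_map, List.flatMap_cons, List.flatMap_map]

lemma pvGen (x : String) (L : List String) (h0 : String) :
    (List.range (x :: L).length).flatMap (fun k =>
        (if k = 0 then [h0] else [pvTr ((x :: L).getD (k - 1) "") ((x :: L).getD k "")])
        ++ (if k = (x :: L).length - 1 then [pvFin ((x :: L).getLast?.getD "")] else []))
    = h0 :: ((x :: L).zip L).map (fun p => pvTr p.1 p.2)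
        ++ [pvFin ((x :: L).getLast?.getD "")] := by
  induction L generalizing x h0 with
  | nil => simp
  | cons y L' ih =>
    rw [show (x :: y :: L').length = (y :: L').length + 1 from rfl, pvShift]
    have hFG : ∀ k ∈ List.range (y :: L').length,
        ((if k + 1 = 0 then [h0]
          else [pvTr ((x :: y :: L').getD (k + 1 - 1) "") ((x :: y :: L').getD (k + 1) "")])
         ++ (if k + 1 = (y :: L').length + 1 - 1
             then [pvFin ((x :: y :: L').getLast?.getD "")] else []))
        = ((if k = 0 then [pvTr x y]
            else [pvTr ((y :: L').getD (k - 1) "") ((y :: L').getD k "")])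
           ++ (if k = (y :: L').length - 1
               then [pvFin ((y :: L').getLast?.getD "")] else [])) := by
      intro k _
      cases k with
      | zero => cases L' <;> simp
      | succ j => simp
    rw [List.flatMap_congr hFG, ih y (pvTr x y)]
    simp

def pvLab (i : Int) (p : List (String × String)) : String :=
  PySem.Dict.getD (PySem.Dict.mk p) "label" ("State" ++ PySem.Int.toStr (i + 1))

def pvSeg (dp : List (List (String × String))) (ip : Int × List (String × String)) : List String :=
  (if ip.1 == 0 then ["    [*] --> " ++ pvLab ip.1 ip.2]
   else [pvTr (PySem.Dict.getD (PySem.Dict.mk (PySem.List.pyGetD dp (ip.1 - 1) [])) "label"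
                 ("State" ++ PySem.Int.toStr ip.1)) (pvLab ip.1 ip.2)])
  ++ (if ip.1 == (dp.length : Int) - 1 then [pvFin (pvLab ip.1 ip.2)] else [])

def pvLabels (dp : List (List (String × String))) : List String :=
  (PySem.List.enumerate dp).map (fun jp =>
    PySem.Dict.getD (PySem.Dict.mk jp.2) "label" ("State" ++ PySem.Int.toStr (jp.1 + 1)))

lemma pvLabels_length (dp : List (List (String × String))) : (pvLabels dp).length = dp.length := by
  simp [pvLabels, PySem.List.length_enumerate]

lemma pvLabels_getD (dp : List (List (String × String))) (k : Nat) (hk : k < dp.length) :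
    (pvLabels dp).getD k "" = pvLab (k : Int) (dp.getD k []) := by
  have hk' : k < (pvLabels dp).length := by rw [pvLabels_length]; exact hk
  rw [List.getD_eq_getElem _ _ hk', List.getD_eq_getElem _ _ hk]
  simp [pvLabels, PySem.List.getElem_enumerate, pvLab]

lemma pvSeg_pointwise (dp : List (List (String × String))) (k : Nat) (hk : k < dp.length) :
    pvSeg dp ((k : Int), PySem.List.pyGetD dp (k : Int) []) =
      (if k = 0 then ["    [*] --> " ++ pvLab 0 (dp.getD 0 [])]
       else [pvTr ((pvLabels dp).getD (k - 1) "") ((pvLabels dp).getD k "")])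
      ++ (if k = (pvLabels dp).length - 1
          then [pvFin ((pvLabels dp).getLast?.getD "")] else []) := by
  have hgetD : PySem.List.pyGetD dp ((k : Nat) : Int) [] = dp.getD k [] :=
    PySem.List.pyGetD_natCast dp k []
  unfold pvSeg
  dsimp only
  congr 1
  · by_cases h0 : k = 0
    · subst h0
      rw [if_pos (by norm_num), if_pos rfl]
      simp [pvLab, PySem.List.pyGetD_zero]
    · obtain ⟨j, rfl⟩ : ∃ j, k = j + 1 := ⟨k - 1, by omega⟩
      rw [if_neg (by simp only [beq_iff_eq]; omega), if_neg h0]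
      simp only [Nat.add_sub_cancel]
      rw [pvLabels_getD dp (j + 1) hk, pvLabels_getD dp j (by omega)]
      have harg : ((j + 1 : Nat) : Int) - 1 = ((j : Nat) : Int) := by push_cast; ring
      rw [harg, PySem.List.pyGetD_natCast, PySem.List.pyGetD_natCast]
      simp [pvLab, pvTr]
  · have hLlen : (pvLabels dp).length = dp.length := pvLabels_length dp
    by_cases h : k = dp.length - 1
    · rw [if_pos (by simp only [beq_iff_eq]; omega), if_pos (by omega)]
      have hk2 : (pvLabels dp).length - 1 < (pvLabels dp).length := by omega
      rw [List.getLast?_eq_getElem?, ← List.getD_eq_getElem?_getD]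
      rw [pvLabels_getD dp ((pvLabels dp).length - 1) (by omega)]
      subst h
      rw [hgetD]
      simp [hLlen]
    · rw [if_neg (by simp only [beq_iff_eq]; omega), if_neg (by omega)]

lemma pvFoldl (dp : List (List (String × String))) (init : List String) :
    (PySem.List.enumerate dp).foldl (fun lines ip =>
      let i := ip.1
      let point := ip.2
      let label := PySem.Dict.getD (PySem.Dict.mk point) "label" ("State" ++ PySem.Int.toStr (i + 1))
      let lines := if i == 0 then lines ++ ["    [*] --> " ++ label]
        else
          let prev_label := PySem.Dict.getD (PySem.Dict.mk (PySem.List.pyGetD dp (i - 1) [])) "label" ("State" ++ PySem.Int.toStr i)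
          lines ++ ["    " ++ prev_label ++ " --> " ++ label]
      if i == (dp.length : Int) - 1 then lines ++ ["    " ++ label ++ " --> [*]"] else lines) init
    = init ++ (PySem.List.enumerate dp).flatMap (pvSeg dp) := by
  have h : (fun (lines : List String) (ip : Int × List (String × String)) =>
      let i := ip.1
      let point := ip.2
      let label := PySem.Dict.getD (PySem.Dict.mk point) "label" ("State" ++ PySem.Int.toStr (i + 1))
      let lines := if i == 0 then lines ++ ["    [*] --> " ++ label]
        else
          let prev_label := PySem.Dict.getD (PySem.Dict.mk (PySem.List.pyGetD dp (i - 1) [])) "label" ("State" ++ PySem.Int.toStr i)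
          lines ++ ["    " ++ prev_label ++ " --> " ++ label]
      if i == (dp.length : Int) - 1 then lines ++ ["    " ++ label ++ " --> [*]"] else lines)
      = fun lines ip => lines ++ pvSeg dp ip := by
    funext lines ip
    simp only [pvSeg, pvLab, pvTr, pvFin]
    split_ifs <;> simp
  rw [h, PySem.List.foldl_append_eq_flatMap]

lemma pvFlatMap (dp : List (List (String × String))) :
    (PySem.List.enumerate dp).flatMap (pvSeg dp)
    = (List.range dp.length).flatMap (fun k =>
        (if k = 0 then ["    [*] --> " ++ pvLab 0 (dp.getD 0 [])]
         else [pvTr ((pvLabels dp).getD (k - 1) "") ((pvLabels dp).getD k "")])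
        ++ (if k = (pvLabels dp).length - 1
            then [pvFin ((pvLabels dp).getLast?.getD "")] else [])) := by
  rw [PySem.List.enumerate_eq_map_pyRange dp []]
  rw [show PySem.List.len dp = ((dp.length : Nat) : Int) from by simp]
  rw [PySem.List.pyRange_zero_nat, List.flatMap_map, List.flatMap_map]
  exact List.flatMap_congr (fun k hk => pvSeg_pointwise dp k (List.mem_range.mp hk))

-- B-side: consecutive pairs of (x :: xs ++ [z]) are (x,head) then pairs of xs++[z];
-- zipping a nonempty list against its tail extended by a sentinel appends one final pair.
lemma pvZipSentinel (x : String) (xs : List String) (z : String) :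
    ((x :: xs) ++ [z]).zip (xs ++ [z]) = (x :: xs).zip xs ++ [((x :: xs).getLast?.getD "", z)] := by
  induction xs generalizing x with
  | nil => simp
  | cons y ys ih =>
    simp only [List.cons_append, List.zip_cons_cons]
    rw [← List.cons_append, ih y]
    simp

-- B's string-accumulating loop over the edge list is a join with "\n".
lemma pvJoinStep (s a b : String) (xs : List String) :
    PySem.Str.join "\n" ((s ++ "\n    " ++ a ++ " --> " ++ b) :: xs)
    = PySem.Str.join "\n" (s :: ("    " ++ a ++ " --> " ++ b) :: xs) := by
  simp [PySem.Str.join, PySem.Chars.join]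
  congr 1
  generalize (List.map String.toList xs) = ys
  cases ys <;> simp [List.intercalate, List.intersperse]

-- B's string-accumulating loop over the edge list is a join with "\n".
lemma pvStrFold (l : List (String × String)) (s : String) :
    l.foldl (fun acc ab => acc ++ "\n    " ++ ab.1 ++ " --> " ++ ab.2) s
    = PySem.Str.join "\n" (s :: l.map (fun ab => "    " ++ ab.1 ++ " --> " ++ ab.2)) := by
  induction l generalizing s with
  | nil => simp [PySem.Str.join]
  | cons ab l ih =>
    rw [List.foldl_cons, ih, List.map_cons, pvJoinStep]

lemma pvFin_eq (s : String) : pvFin s = pvTr s "[*]" := by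
  simp [pvFin, pvTr, ← String.toList_inj]

theorem generate_state_diagram_py_main (dp : List (List (String × String))) :
    generate_state_diagram_py dp = generate_state_diagram_py_alt dp := by
  cases dp with
  | nil => rfl
  | cons d0 rest =>
    have hA : generate_state_diagram_py (d0 :: rest)
        = PySem.Str.join "\n" (["stateDiagram-v2"]
            ++ (PySem.List.enumerate (d0 :: rest)).flatMap (pvSeg (d0 :: rest))) :=
      congrArg (PySem.Str.join "\n") (pvFoldl (d0 :: rest) ["stateDiagram-v2"])
    rw [hA, pvFlatMap (d0 :: rest)]
    have hLb : ∃ l0 Ls, pvLabels (d0 :: rest) = l0 :: Ls := by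
      refine ⟨?_, ?_, ?_⟩
      · exact pvLab 0 d0
      · exact (PySem.List.enumerate rest 1).map (fun jp =>
          PySem.Dict.getD (PySem.Dict.mk jp.2) "label" ("State" ++ PySem.Int.toStr (jp.1 + 1)))
      · simp [pvLabels, PySem.List.enumerate_cons, pvLab]
    obtain ⟨l0, Ls, hLb⟩ := hLb
    have hlen : (d0 :: rest).length = (l0 :: Ls).length := by
      rw [← hLb, pvLabels_length]
    have hd0 : pvLab 0 ((d0 :: rest).getD 0 []) = l0 := by
      have := pvLabels_getD (d0 :: rest) 0 (by simp)
      rw [hLb] at this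
      simpa using this.symm
    rw [hLb, hlen, hd0, pvGen l0 Ls ("    [*] --> " ++ l0)]
    -- B side
    show _ = generate_state_diagram_py_alt (d0 :: rest)
    unfold generate_state_diagram_py_alt
    rw [if_neg (by simp)]
    simp only [PySem.List.foldl_append_singleton_eq_map]
    have hnodes : (["[*]"] ++ (PySem.List.enumerate (d0 :: rest)).map (fun ip =>
        PySem.Dict.getD (PySem.Dict.mk ip.2) "label" ("State" ++ PySem.Int.toStr (ip.1 + 1))) ++ ["[*]"])
        = "[*]" :: (l0 :: Ls) ++ ["[*]"] := by
      rw [show (PySem.List.enumerate (d0 :: rest)).map (fun ip =>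
        PySem.Dict.getD (PySem.Dict.mk ip.2) "label" ("State" ++ PySem.Int.toStr (ip.1 + 1)))
          = pvLabels (d0 :: rest) from rfl, hLb]
      simp
    rw [hnodes]
    have hslice : PySem.List.slice ("[*]" :: (l0 :: Ls) ++ ["[*]"]) (some 1) none
        = (l0 :: Ls) ++ ["[*]"] := by
      rw [PySem.List.slice_some_none]
      have h1 : PySem.List.clampIdx ("[*]" :: (l0 :: Ls) ++ ["[*]"]).length 1 = 1 := by
        simp [PySem.List.clampIdx]
      rw [h1]
      simp
    rw [hslice]
    have hzip : ("[*]" :: (l0 :: Ls) ++ ["[*]"]).zip ((l0 :: Ls) ++ ["[*]"])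
        = ("[*]", l0) :: ((l0 :: Ls).zip Ls ++ [((l0 :: Ls).getLast?.getD "", "[*]")]) := by
      rw [show ("[*]" :: (l0 :: Ls) ++ ["[*]"]).zip ((l0 :: Ls) ++ ["[*]"])
          = ("[*]", l0) :: (((l0 :: Ls) ++ ["[*]"]).zip (Ls ++ ["[*]"])) from by simp,
        pvZipSentinel]
    rw [hzip, pvStrFold]
    simp only [List.map_append, List.map]
    rw [pvFin_eq]
    simp [pvTr]

-- ===== VERDICT (by name: the statement is the Claim_ definition above) =====
theorem generate_state_diagram_py_spec : Claim_equal_generate_state_diagram_py := by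
  intro dp _
  exact generate_state_diagram_py_main dp
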